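-- pv_equiv track=rewrite | github.com/joelluijmes/advent-of-code | 2025/day04/part1.py | find_accessible_spots
-- ===== SOURCE A (Python) =====
-- PAPER_ROLL = "@"
--
-- ACCESSIBLE = "x"
--
-- EMPTY_SPACE = "."
--
-- def find_accessible_spots(grid: list[str]):
--     len_rows = len(grid)
--     len_cols = len(grid[0])
--
--     # Create result grid, note we cannot nest [..] * syntax as it refers to the same list
--     result = [[EMPTY_SPACE] * len_cols for _ in range(len_rows)]
--
--     for y in range(len_rows):
--         for x in range(len_cols):
--             value = grid[y][x]
--
--             if value != PAPER_ROLL: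
--                 result[y][x] = value
--                 continue
--
--             directions = [
--                 (-1, 0),  # top
--                 (-1, 1),  # top-right
--                 (0, 1),  # right
--                 (1, 1),  # bottom-right
--                 (1, 0),  # bottom
--                 (1, -1),  # bottom-left
--                 (0, -1),  # left
--                 (-1, -1),  # top-left
--             ]
--
--             # Consider all valid surrounding values
--             surroundings = [grid[y + ny][x + nx] for ny, nx in directions if 0 <= y + ny < len_rows and 0 <= x + nx < len_cols]
--
--             totals = sum(1 for x in surroundings if x == PAPER_ROLL)
--             if totals < 4:
--                 result[y][x] = ACCESSIBLE
--             else: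
--                 result[y][x] = value
--
--     return result
-- ===== SOURCE B (Python) =====
-- PAPER_ROLL = "@"
-- ACCESSIBLE = "x"
-- EMPTY_SPACE = "."
--
--
-- def find_accessible_spots(grid: list[str]):
--     len_rows = len(grid)
--     len_cols = len(grid[0])
--
--     # Summed-area table: P[i][j] = number of paper rolls in grid[:i], columns [:j]
--     P = [[0] * (len_cols + 1)]
--     for row in grid:
--         prev = P[-1]
--         cur = [0]
--         acc = 0
--         for j in range(len_cols):
--             acc += row[j] == PAPER_ROLL
--             cur.append(prev[j + 1] + acc)
--         P.append(cur)
--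
--     result = []
--     for y in range(len_rows):
--         out_row = []
--         for x in range(len_cols):
--             value = grid[y][x]
--             if value != PAPER_ROLL:
--                 out_row.append(value)
--             else:
--                 y1, y2 = max(0, y - 1), min(len_rows, y + 2)
--                 x1, x2 = max(0, x - 1), min(len_cols, x + 2)
--                 rolls = P[y2][x2] - P[y1][x2] - P[y2][x1] + P[y1][x1] - 1
--                 out_row.append(ACCESSIBLE if rolls < 4 else value)
--         result.append(out_row)
--     return result
-- ===== Notes on version B (the rewrite author's own statement) =====
-- stated objective: alternative
-- what changed: Replaces A's per-cell 8-direction neighbor scan with a 2D summed-area (prefix-sum) table built in one pass over the grid; each '@' cell's clamped 3x3 window count is then answered by a four-corner inclusion-exclusion query on the table, minus 1 for the center cell.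
import Mathlib
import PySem

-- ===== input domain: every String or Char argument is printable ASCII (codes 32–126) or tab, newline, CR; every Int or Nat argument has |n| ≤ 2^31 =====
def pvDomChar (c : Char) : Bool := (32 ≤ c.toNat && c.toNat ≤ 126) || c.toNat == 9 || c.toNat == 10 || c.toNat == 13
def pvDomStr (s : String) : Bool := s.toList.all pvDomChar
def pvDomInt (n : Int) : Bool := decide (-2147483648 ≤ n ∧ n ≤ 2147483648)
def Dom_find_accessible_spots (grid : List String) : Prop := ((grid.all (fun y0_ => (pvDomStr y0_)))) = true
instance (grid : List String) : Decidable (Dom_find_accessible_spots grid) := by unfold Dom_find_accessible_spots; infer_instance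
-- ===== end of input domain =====

-- B replaces A's per-cell 8-direction neighbour scan by a 2D summed-area (prefix-sum) table
-- built in one pass; each '@' cell's clamped 3x3 window count is a four-corner
-- inclusion-exclusion query on the table minus 1 for the center: an alternative algorithm.
-- ===== PORT A =====
-- the 8 neighbour offsets, in A's order
def pvDirs : List (Int × Int) :=
  [(-1, 0), (-1, 1), (0, 1), (1, 1), (1, 0), (1, -1), (0, -1), (-1, -1)]

-- grid[y][x] as Python's 1-char string; the "" default is unreachable under Pre_
def pvCellStr (grid : List String) (y x : Int) : String :=
  match (PySem.List.pyGet? grid y).bind (fun row => PySem.Str.pyGet? row x) with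
  | some c => String.ofList [c]
  | none => ""

def find_accessible_spots (grid : List String) : List (List String) :=
  let len_rows : Int := PySem.List.len grid
  -- grid[0] raises IndexError on an empty grid; Pre_ excludes that
  let len_cols : Int := PySem.Str.len ((PySem.List.pyGet? grid 0).getD "")
  let result : List (List String) :=
    (PySem.List.pyRange 0 len_rows 1).map (fun _ => PySem.List.pyRepeat ["."] len_cols)
  (PySem.List.pyRange 0 len_rows 1).foldl (fun result y =>
    (PySem.List.pyRange 0 len_cols 1).foldl (fun result x =>
      let value := pvCellStr grid y x
      if value ≠ "@" then
        PySem.List.pySetD result y (PySem.List.pySetD (PySem.List.pyGetD result y []) x value)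
      else
        let surroundings := pvDirs.filterMap (fun d =>
          if 0 ≤ y + d.1 ∧ y + d.1 < len_rows ∧ 0 ≤ x + d.2 ∧ x + d.2 < len_cols then
            some (pvCellStr grid (y + d.1) (x + d.2))
          else none)
        let totals : Int := ((surroundings.filter (fun s => s = "@")).length : Int)
        if totals < 4 then
          PySem.List.pySetD result y (PySem.List.pySetD (PySem.List.pyGetD result y []) x "x")
        else
          PySem.List.pySetD result y (PySem.List.pySetD (PySem.List.pyGetD result y []) x value))
      result) result

-- ===== PORT B =====
-- one row of B's summed-area table: the inner 'for j in range(len_cols)' loop, state (cur, acc)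
def pvBuildRow (len_cols : Int) (prev : List Int) (row : String) : List Int :=
  ((PySem.List.pyRange 0 len_cols 1).foldl (fun (s : List Int × Int) j =>
      let acc := s.2 + (if (PySem.Str.pyGet? row j).getD ' ' = '@' then 1 else 0)
      (s.1 ++ [(PySem.List.pyGet? prev (j + 1)).getD 0 + acc], acc)) ([0], 0)).1

-- B's 'for row in grid' loop building the table P
def pvBuildP (grid : List String) (len_cols : Int) : List (List Int) :=
  grid.foldl (fun P row =>
      P ++ [pvBuildRow len_cols ((PySem.List.pyGet? P (-1)).getD []) row])
    [PySem.List.pyRepeat [0] (len_cols + 1)]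

def find_accessible_spots_alt (grid : List String) : List (List String) :=
  let len_rows : Int := PySem.List.len grid
  let len_cols : Int := PySem.Str.len ((PySem.List.pyGet? grid 0).getD "")
  let P := pvBuildP grid len_cols
  (PySem.List.pyRange 0 len_rows 1).foldl (fun result y =>
    let out_row := (PySem.List.pyRange 0 len_cols 1).foldl (fun out_row x =>
      let value := pvCellStr grid y x
      if value ≠ "@" then out_row ++ [value]
      else
        let y1 := max 0 (y - 1)
        let y2 := min len_rows (y + 2)
        let x1 := max 0 (x - 1)
        let x2 := min len_cols (x + 2)
        let rolls := (PySem.List.pyGet? ((PySem.List.pyGet? P y2).getD []) x2).getD 0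
            - (PySem.List.pyGet? ((PySem.List.pyGet? P y1).getD []) x2).getD 0
            - (PySem.List.pyGet? ((PySem.List.pyGet? P y2).getD []) x1).getD 0
            + (PySem.List.pyGet? ((PySem.List.pyGet? P y1).getD []) x1).getD 0 - 1
        if rolls < 4 then out_row ++ ["x"] else out_row ++ [value]) []
    result ++ [out_row]) []

-- ===== PRECONDITION & SPEC =====
-- Pre_ is exactly where Python A returns: on an empty grid grid[0] raises IndexError (B raises there too), and a row
-- shorter than the first row makes grid[y][x] raise IndexError for some x < len_cols.
def Pre_find_accessible_spots (grid : List String) : Prop :=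
  grid ≠ [] ∧ ∀ s ∈ grid, (grid.headD "").toList.length ≤ s.toList.length
instance (grid : List String) : Decidable (Pre_find_accessible_spots grid) := by
  unfold Pre_find_accessible_spots; infer_instance

def pvWitness_find_accessible_spots : List String := ["@@.", ".@@"]

def Spec_find_accessible_spots (grid : List String) (out : List (List String)) : Prop := out = find_accessible_spots_alt grid
instance (grid : List String) (out : List (List String)) : Decidable (Spec_find_accessible_spots grid out) := by unfold Spec_find_accessible_spots; infer_instance

-- ===== CLAIM (what is proved, stated in full; the proofs are below) =====
def Claim_equal_find_accessible_spots : Prop := ∀ (grid : List String), Dom_find_accessible_spots grid → Pre_find_accessible_spots grid → Spec_find_accessible_spots grid (find_accessible_spots grid)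

-- ===== LEMMAS AND PROOFS =====

-- ---- abbreviations used by the proofs ----
def pvC (grid : List String) : Nat := (grid.headD "").toList.length

-- indicator of '@' at column c of a row (row bounds assumed), resp. with the row bound
def pvCInd (s : List Char) (C : Nat) (c : Int) : Nat :=
  if 0 ≤ c ∧ c < (C : Int) ∧ s.getD c.toNat ' ' = '@' then 1 else 0

def pvInd (grid : List String) (r c : Int) : Nat :=
  if 0 ≤ r ∧ r < (grid.length : Int) then pvCInd (grid.getD r.toNat "").toList (pvC grid) c else 0

-- A's neighbour count, as the port computes it
def pvCnt (grid : List String) (y x : Int) : Nat :=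
  ((pvDirs.filterMap (fun d =>
      if 0 ≤ y + d.1 ∧ y + d.1 < (grid.length : Int) ∧ 0 ≤ x + d.2 ∧ x + d.2 < (pvC grid : Int) then
        some (pvCellStr grid (y + d.1) (x + d.2))
      else none)).filter (fun s => s = "@")).length

-- A's per-cell value
def pvCellA (grid : List String) (y x : Int) : String :=
  if pvCellStr grid y x ≠ "@" then pvCellStr grid y x
  else if ((pvCnt grid y x : Int) < 4) then "x" else pvCellStr grid y x

-- '@'-count of the first j columns of a row
def pvRcnt (s : String) (j : Nat) : Int :=
  (((s.toList.take j).countP (fun c => c == '@') : Nat) : Int)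

-- the summed-area value: '@'-count of grid[:i], columns [:j]
def pvS (grid : List String) (i j : Nat) : Int :=
  ((grid.take i).map (fun s => pvRcnt s j)).sum

-- table lookup, as B's port performs it
def pvLook (grid : List String) (r c : Int) : Int :=
  (PySem.List.pyGet? ((PySem.List.pyGet? (pvBuildP grid (pvC grid : Int)) r).getD []) c).getD 0

-- B's per-cell value
def pvCellB (grid : List String) (y x : Int) : String :=
  if pvCellStr grid y x ≠ "@" then pvCellStr grid y x
  else if pvLook grid (min (grid.length : Int) (y + 2)) (min (pvC grid : Int) (x + 2))
        - pvLook grid (max 0 (y - 1)) (min (pvC grid : Int) (x + 2))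
        - pvLook grid (min (grid.length : Int) (y + 2)) (max 0 (x - 1))
        + pvLook grid (max 0 (y - 1)) (max 0 (x - 1)) - 1 < 4 then "x"
  else pvCellStr grid y x

-- ---- generic fold-shape lemmas ----
theorem pv_rowfold (g : Int → String) (row : List String) (k : Nat) (hk : k ≤ row.length) :
    (PySem.List.pyRange 0 (k : Int) 1).foldl (fun r x => PySem.List.pySetD r x (g x)) row
      = (List.range k).map (fun (i : Nat) => g (i : Int)) ++ row.drop k := by
  induction k with
  | zero => simp [PySem.List.pyRange_one_eq_nil]
  | succ k ih =>
    have hk' : k ≤ row.length := Nat.le_of_succ_le hk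
    have hcast : ((k + 1 : Nat) : Int) = (k : Int) + 1 := by push_cast; ring
    rw [hcast, PySem.List.pyRange_one_succ_right (by positivity), List.foldl_append]
    rw [ih hk']
    simp only [List.foldl_cons, List.foldl_nil, PySem.List.pySetD_natCast]
    rw [List.set_append, List.range_succ, List.map_append]
    have hlen : ((List.range k).map (fun (i : Nat) => g (i : Int))).length = k := by simp
    rw [if_neg (by omega), hlen, Nat.sub_self]
    rw [List.drop_eq_getElem_cons (by omega : k < row.length), List.set_cons_zero]
    simp

theorem pv_innerfold (y : Nat) (g : Int → String) (xs : List Int) (res : List (List String))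
    (hy : y < res.length) :
    xs.foldl (fun r x => PySem.List.pySetD r (y : Int) (PySem.List.pySetD (PySem.List.pyGetD r (y : Int) []) x (g x))) res
      = res.set y (xs.foldl (fun row x => PySem.List.pySetD row x (g x)) (res.getD y [])) := by
  induction xs generalizing res with
  | nil =>
    simp only [List.foldl_nil]
    rw [List.getD_eq_getElem res [] hy, List.set_getElem_self]
  | cons x xs ih =>
    rw [List.foldl_cons, List.foldl_cons,
        ih _ (by rw [PySem.List.pySetD_natCast]; simpa using hy)]
    rw [PySem.List.pySetD_natCast, PySem.List.pyGetD_natCast, List.set_set,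
        List.getD_eq_getElem _ _ (by simpa using hy), List.getElem_set_self]

theorem pv_gridfold (g : Int → Int → String) (C : Nat) (init : List (List String)) (k : Nat)
    (hk : k ≤ init.length) :
    (PySem.List.pyRange 0 (k : Int) 1).foldl (fun res y =>
        (PySem.List.pyRange 0 (C : Int) 1).foldl (fun r x =>
          PySem.List.pySetD r y (PySem.List.pySetD (PySem.List.pyGetD r y []) x (g y x))) res) init
      = (List.range k).map (fun (y : Nat) =>
          (PySem.List.pyRange 0 (C : Int) 1).foldl (fun row x => PySem.List.pySetD row x (g (y : Int) x)) (init.getD y []))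
        ++ init.drop k := by
  induction k with
  | zero => simp [PySem.List.pyRange_one_eq_nil]
  | succ k ih =>
    have hk' : k ≤ init.length := Nat.le_of_succ_le hk
    have hcast : ((k + 1 : Nat) : Int) = (k : Int) + 1 := by push_cast; ring
    rw [hcast, PySem.List.pyRange_one_succ_right (by positivity), List.foldl_append]
    rw [ih hk']
    simp only [List.foldl_cons, List.foldl_nil]
    set pre := (List.range k).map (fun (y : Nat) =>
          (PySem.List.pyRange 0 (C : Int) 1).foldl (fun row x => PySem.List.pySetD row x (g (y : Int) x)) (init.getD y [])) with hpre
    have hlen : pre.length = k := by simp [hpre]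
    have hlen2 : (pre ++ init.drop k).length = init.length := by simp [hlen]; omega
    rw [pv_innerfold k _ _ _ (by omega)]
    have hgetD : (pre ++ init.drop k).getD k [] = init.getD k [] := by
      rw [List.getD_eq_getElem?_getD, List.getD_eq_getElem?_getD,
          List.getElem?_append_right (by omega), hlen, Nat.sub_self, List.getElem?_drop]
      norm_num
    rw [hgetD, List.set_append, if_neg (by omega), hlen, Nat.sub_self]
    rw [List.drop_eq_getElem_cons (by omega : k < init.length), List.set_cons_zero]
    rw [List.range_succ, List.map_append, List.append_assoc]
    congr 1

-- ---- shape of port A ----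
theorem pv_bodyA (grid : List String) (r : List (List String)) (y x : Int) :
    (if pvCellStr grid y x ≠ "@" then
        PySem.List.pySetD r y (PySem.List.pySetD (PySem.List.pyGetD r y []) x (pvCellStr grid y x))
      else
        if ((List.filter (fun s => decide (s = "@"))
              (List.filterMap (fun d =>
                if 0 ≤ y + d.1 ∧ y + d.1 < (grid.length : Int) ∧ 0 ≤ x + d.2 ∧ x + d.2 < (pvC grid : Int) then
                  some (pvCellStr grid (y + d.1) (x + d.2))
                else none) pvDirs)).length : Int) < 4 then
          PySem.List.pySetD r y (PySem.List.pySetD (PySem.List.pyGetD r y []) x "x")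
        else
          PySem.List.pySetD r y (PySem.List.pySetD (PySem.List.pyGetD r y []) x (pvCellStr grid y x)))
      = PySem.List.pySetD r y (PySem.List.pySetD (PySem.List.pyGetD r y []) x (pvCellA grid y x)) := by
  simp only [pvCellA, pvCnt]
  split_ifs <;> rfl

theorem pvA_eq (grid : List String) (hne : grid ≠ []) :
    find_accessible_spots grid
      = (List.range grid.length).map (fun (y : Nat) => (List.range (pvC grid)).map (fun (x : Nat) => pvCellA grid (y : Int) (x : Int))) := by
  have hlen : PySem.List.len grid = (grid.length : Int) := PySem.List.len_eq grid
  have hLC : PySem.Str.len ((PySem.List.pyGet? grid 0).getD "") = (pvC grid : Int) := by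
    cases grid with
    | nil => exact absurd rfl hne
    | cons a t => simp [pvC, PySem.Str.len_eq]
  simp only [find_accessible_spots, hlen, hLC, pv_bodyA]
  rw [pv_gridfold (fun y x => pvCellA grid y x) (pvC grid) _ grid.length
        (by simp [PySem.List.length_pyRange_one])]
  have hinit : (List.map (fun _ => PySem.List.pyRepeat ["."] ((pvC grid : Nat) : Int)) (PySem.List.pyRange 0 (grid.length : Int) 1))
      = List.replicate grid.length (List.replicate (pvC grid) ".") := by
    simp [List.map_const', PySem.List.length_pyRange_one, PySem.List.pyRepeat_singleton]
  rw [hinit]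
  rw [show (List.replicate grid.length (List.replicate (pvC grid) ".")).drop grid.length = [] from
    List.drop_of_length_le (by simp)]
  rw [List.append_nil]
  refine List.map_congr_left ?_
  intro y hy
  have hrow : (List.replicate grid.length (List.replicate (pvC grid) ".")).getD y [] = List.replicate (pvC grid) "." := by
    rw [List.getD_eq_getElem _ _ (by simpa using hy)]; simp
  rw [hrow, pv_rowfold (fun x => pvCellA grid (y : Int) x) _ (pvC grid) (by simp)]
  simp

-- ---- shape of port B ----
theorem pv_map_pyRange {α : Type} (f : Int → α) (n : Nat) :
    (PySem.List.pyRange 0 (n : Int) 1).map f = (List.range n).map (fun (k : Nat) => f (k : Int)) := by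
  rw [PySem.List.pyRange_one]
  simp

theorem pv_bodyB (grid : List String) (out : List String) (y x : Int) :
    (if pvCellStr grid y x ≠ "@" then out ++ [pvCellStr grid y x]
      else
        if (PySem.List.pyGet? ((PySem.List.pyGet? (pvBuildP grid (pvC grid : Int)) (min (grid.length : Int) (y + 2))).getD []) (min (pvC grid : Int) (x + 2))).getD 0
            - (PySem.List.pyGet? ((PySem.List.pyGet? (pvBuildP grid (pvC grid : Int)) (max 0 (y - 1))).getD []) (min (pvC grid : Int) (x + 2))).getD 0
            - (PySem.List.pyGet? ((PySem.List.pyGet? (pvBuildP grid (pvC grid : Int)) (min (grid.length : Int) (y + 2))).getD []) (max 0 (x - 1))).getD 0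
            + (PySem.List.pyGet? ((PySem.List.pyGet? (pvBuildP grid (pvC grid : Int)) (max 0 (y - 1))).getD []) (max 0 (x - 1))).getD 0 - 1 < 4 then out ++ ["x"]
        else out ++ [pvCellStr grid y x])
      = out ++ [pvCellB grid y x] := by
  simp only [pvCellB, pvLook]
  split_ifs <;> rfl

theorem pvB_eq (grid : List String) (hne : grid ≠ []) :
    find_accessible_spots_alt grid
      = (List.range grid.length).map (fun (y : Nat) => (List.range (pvC grid)).map (fun (x : Nat) => pvCellB grid (y : Int) (x : Int))) := by
  have hlen : PySem.List.len grid = (grid.length : Int) := PySem.List.len_eq grid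
  have hLC : PySem.Str.len ((PySem.List.pyGet? grid 0).getD "") = (pvC grid : Int) := by
    cases grid with
    | nil => exact absurd rfl hne
    | cons a t => simp [pvC, PySem.Str.len_eq]
  simp only [find_accessible_spots_alt, hlen, hLC, pv_bodyB]
  simp only [PySem.List.foldl_append_singleton_eq_map, List.nil_append]
  simp only [pv_map_pyRange]

-- ---- the counting argument (A's neighbour list) ----
theorem pv_take1 {α : Type} (s : List α) (a : Nat) (h : a + 1 ≤ s.length) :
    (s.drop a).take 1 = [s[a]'(by omega)] := by
  rw [List.drop_eq_getElem_cons (by omega), List.take_succ_cons, List.take_zero]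

theorem pv_take2 {α : Type} (s : List α) (a : Nat) (h : a + 2 ≤ s.length) :
    (s.drop a).take 2 = [s[a]'(by omega), s[a+1]'(by omega)] := by
  rw [List.drop_eq_getElem_cons (by omega), List.take_succ_cons,
      List.drop_eq_getElem_cons (by omega), List.take_succ_cons, List.take_zero]

theorem pv_take3 {α : Type} (s : List α) (a : Nat) (h : a + 3 ≤ s.length) :
    (s.drop a).take 3 = [s[a]'(by omega), s[a+1]'(by omega), s[a+2]'(by omega)] := by
  rw [List.drop_eq_getElem_cons (by omega), List.take_succ_cons,
      List.drop_eq_getElem_cons (by omega), List.take_succ_cons,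
      List.drop_eq_getElem_cons (by omega), List.take_succ_cons, List.take_zero]

theorem pv_cInd_in (s : List Char) (C : Nat) (c : Int) (h1 : 0 ≤ c) (h2 : c < (C : Int))
    (hs : C ≤ s.length) :
    pvCInd s C c = if s[c.toNat]'(by omega) = '@' then 1 else 0 := by
  unfold pvCInd
  rw [List.getD_eq_getElem _ _ (by omega)]
  exact if_congr ⟨fun h => h.2.2, fun h => ⟨h1, h2, h⟩⟩ rfl rfl

theorem pv_cInd_out (s : List Char) (C : Nat) (c : Int) (h : ¬ (0 ≤ c ∧ c < (C : Int))) :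
    pvCInd s C c = 0 := by
  unfold pvCInd
  rw [if_neg (fun hh => h ⟨hh.1, hh.2.1⟩)]

theorem pv_colcount (s : List Char) (C x : Nat) (hx : x < C) (hs : C ≤ s.length) :
    ((PySem.List.slice s (some (max 0 ((x : Int) - 1))) (some (min ((x : Int) + 2) (C : Int)))).countP
        (fun ch => ch == '@'))
      = pvCInd s C ((x : Int) - 1) + pvCInd s C (x : Int) + pvCInd s C ((x : Int) + 1) := by
  have hlo : max 0 ((x : Int) - 1) = ((x - 1 : Nat) : Int) := by omega
  have hhi : min ((x : Int) + 2) (C : Int) = ((min (x + 2) C : Nat) : Int) := by omega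
  rw [hlo, hhi, PySem.List.slice_natCast]
  rw [pv_cInd_in s C (x : Int) (by omega) (by omega) hs]
  rcases Nat.eq_zero_or_pos x with hx0 | hx1
  · subst hx0
    rw [pv_cInd_out s C _ (by omega)]
    by_cases hc2 : 2 ≤ C
    · rw [pv_cInd_in s C _ (by omega) (by omega) hs]
      rw [show min (0 + 2) C = 2 from by omega, show (0 - 1 : Nat) = 0 from rfl,
          show (2 - 0 : Nat) = 2 from rfl, pv_take2 s 0 (by omega)]
      simp only [List.countP_cons, List.countP_nil, beq_iff_eq,
        show ((0 : Nat) : Int).toNat = 0 from rfl, show (((0 : Nat) : Int) + 1).toNat = 1 from rfl]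
      split_ifs <;> omega
    · have hc1 : C = 1 := by omega
      rw [pv_cInd_out s C _ (by omega)]
      rw [show min (0 + 2) C = 1 from by omega, show (0 - 1 : Nat) = 0 from rfl,
          show (1 - 0 : Nat) = 1 from rfl, pv_take1 s 0 (by omega)]
      simp only [List.countP_cons, List.countP_nil, beq_iff_eq,
        show ((0 : Nat) : Int).toNat = 0 from rfl]
      split_ifs <;> omega
  · rw [pv_cInd_in s C ((x : Int) - 1) (by omega) (by omega) hs]
    by_cases hc2 : x + 2 ≤ C
    · rw [pv_cInd_in s C ((x : Int) + 1) (by omega) (by omega) hs]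
      rw [show min (x + 2) C = x + 2 from by omega,
          show (x + 2) - (x - 1) = 3 from by omega, pv_take3 s (x - 1) (by omega)]
      simp only [List.countP_cons, List.countP_nil, beq_iff_eq]
      simp only [show ((x : Int) - 1).toNat = x - 1 from by omega,
          show ((x : Int)).toNat = x from by omega,
          show ((x : Int) + 1).toNat = x + 1 from by omega]
      have e2 : x - 1 + 1 = x := by omega
      have e3 : x - 1 + 2 = x + 1 := by omega
      simp only [e2, e3]
      split_ifs <;> omega
    · have hc1 : C = x + 1 := by omega
      rw [pv_cInd_out s C ((x : Int) + 1) (by omega)]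
      rw [show min (x + 2) C = x + 1 from by omega,
          show (x + 1) - (x - 1) = 2 from by omega, pv_take2 s (x - 1) (by omega)]
      simp only [List.countP_cons, List.countP_nil, beq_iff_eq]
      simp only [show ((x : Int) - 1).toNat = x - 1 from by omega,
          show ((x : Int)).toNat = x from by omega]
      have e2 : x - 1 + 1 = x := by omega
      simp only [e2]
      split_ifs <;> omega

theorem pv_rowlen (grid : List String) (hpre : Pre_find_accessible_spots grid) (r : Nat)
    (hr : r < grid.length) : pvC grid ≤ grid[r].toList.length :=
  hpre.2 grid[r] (List.getElem_mem hr)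

theorem pv_cellStr_at (grid : List String) (hpre : Pre_find_accessible_spots grid) (r c : Int)
    (h1 : 0 ≤ r) (h2 : r < (grid.length : Int)) (h3 : 0 ≤ c) (h4 : c < (pvC grid : Int)) :
    pvCellStr grid r c = String.ofList [(grid.getD r.toNat "").toList.getD c.toNat ' '] := by
  have hrn : r.toNat < grid.length := by omega
  have hcn : c.toNat < pvC grid := by omega
  have hlenrow : pvC grid ≤ grid[r.toNat].toList.length := pv_rowlen grid hpre r.toNat hrn
  unfold pvCellStr
  rw [PySem.List.pyGet?_eq_some_getElem grid h1 (by exact_mod_cast h2)]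
  rw [Option.bind_some]
  have hstr : PySem.Str.pyGet? grid[r.toNat] c = some (grid[r.toNat].toList.getD c.toNat ' ') := by
    rw [show PySem.Str.pyGet? grid[r.toNat] c = PySem.List.pyGet? grid[r.toNat].toList c from by
      simp [pysem]]
    rw [PySem.List.pyGet?_of_nonneg _ h3, List.getElem?_eq_getElem (by omega),
        List.getD_eq_getElem _ _ (by omega)]
  rw [hstr, List.getD_eq_getElem _ _ hrn]

theorem pv_term (grid : List String) (hpre : Pre_find_accessible_spots grid) (r c : Int) :
    (if (Option.map (fun s => decide (s = "@"))
          (if 0 ≤ r ∧ r < (grid.length : Int) ∧ 0 ≤ c ∧ c < (pvC grid : Int) then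
            some (pvCellStr grid r c) else none)).getD false = true then 1 else 0)
      = pvInd grid r c := by
  simp only [pvInd, pvCInd]
  by_cases hb : 0 ≤ r ∧ r < (grid.length : Int) ∧ 0 ≤ c ∧ c < (pvC grid : Int)
  · rw [if_pos hb]
    rw [pv_cellStr_at grid hpre r c hb.1 hb.2.1 hb.2.2.1 hb.2.2.2]
    simp only [Option.map_some, Option.getD_some, decide_eq_true_eq]
    rw [if_pos (show 0 ≤ r ∧ r < (grid.length : Int) from ⟨hb.1, hb.2.1⟩)]
    by_cases hch : (grid.getD r.toNat "").toList.getD c.toNat ' ' = '@'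
    · rw [hch, if_pos (show String.ofList ['@'] = "@" from rfl),
          if_pos (show 0 ≤ c ∧ c < (pvC grid : Int) ∧ ('@':Char) = '@' from ⟨hb.2.2.1, hb.2.2.2, rfl⟩)]
    · rw [if_neg (fun h => hch (by simpa using congrArg String.toList h)),
          if_neg (fun (h : 0 ≤ c ∧ c < (pvC grid : Int) ∧ _) => hch h.2.2)]
  · rw [if_neg hb]
    simp only [Option.map_none, Option.getD_none, Bool.false_eq_true, if_false]
    split_ifs with g1 g2 <;> first | rfl | exact absurd ⟨g1.1, g1.2, g2.1, g2.2.1⟩ hb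

theorem pv_cnt_expand (grid : List String) (y x : Int) (hpre : Pre_find_accessible_spots grid) :
    pvCnt grid y x
      = pvInd grid (y - 1) x + pvInd grid (y - 1) (x + 1) + pvInd grid y (x + 1)
        + pvInd grid (y + 1) (x + 1) + pvInd grid (y + 1) x + pvInd grid (y + 1) (x - 1)
        + pvInd grid y (x - 1) + pvInd grid (y - 1) (x - 1) := by
  unfold pvCnt
  rw [← List.countP_eq_length_filter, List.countP_filterMap]
  simp only [pvDirs, List.countP_cons, List.countP_nil]
  simp only [pv_term grid hpre, add_zero, zero_add, ← sub_eq_add_neg]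
  omega

theorem pv_block (grid : List String) (hpre : Pre_find_accessible_spots grid) (y x : Nat)
    (hy : y < grid.length) (hx : x < pvC grid)
    (hch : (grid.getD y "").toList.getD x ' ' = '@') :
    ((PySem.List.slice grid (some (max 0 ((y : Int) - 1))) (some (min (grid.length : Int) ((y : Int) + 2)))).flatMap
        (fun r => (PySem.Str.slice r (some (max 0 ((x : Int) - 1))) (some (min ((x : Int) + 2) (pvC grid : Int)))).toList)).countP
        (fun ch => ch == '@')
      = pvCnt grid (y : Int) (x : Int) + 1 := by
  have hC : ∀ (k : Nat), k < grid.length → pvC grid ≤ (grid.getD k "").toList.length := by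
    intro k hk
    rw [List.getD_eq_getElem _ _ hk]
    exact pv_rowlen grid hpre k hk
  have hrowc : ∀ s : String, pvC grid ≤ s.toList.length →
      ((PySem.Str.slice s (some (max 0 ((x : Int) - 1))) (some (min ((x : Int) + 2) (pvC grid : Int)))).toList).countP (fun ch => ch == '@')
        = pvCInd s.toList (pvC grid) ((x : Int) - 1) + pvCInd s.toList (pvC grid) (x : Int)
          + pvCInd s.toList (pvC grid) ((x : Int) + 1) := by
    intro s hlen
    rw [PySem.Str.toList_slice, PySem.Chars.slice_eq_listSlice]
    exact pv_colcount s.toList (pvC grid) x hx hlen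
  have hin : ∀ (k : Nat), k < grid.length → ∀ c : Int,
      pvInd grid (k : Int) c = pvCInd (grid.getD k "").toList (pvC grid) c := by
    intro k hk c
    unfold pvInd
    rw [if_pos ⟨by omega, by omega⟩, Int.toNat_natCast]
  have hout : ∀ (r c : Int), ¬ (0 ≤ r ∧ r < (grid.length : Int)) → pvInd grid r c = 0 := by
    intro r c h
    unfold pvInd
    rw [if_neg h]
  have hcen : pvCInd (grid.getD y "").toList (pvC grid) (x : Int) = 1 := by
    rw [pv_cInd_in _ _ _ (by omega) (by omega) (hC y hy), if_pos]
    rw [← List.getD_eq_getElem _ ' ' (by have := hC y hy; omega)]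
    exact hch
  have hlo : max 0 ((y : Int) - 1) = ((y - 1 : Nat) : Int) := by omega
  have hhi : min (grid.length : Int) ((y : Int) + 2) = ((min grid.length (y + 2) : Nat) : Int) := by omega
  rw [hlo, hhi, PySem.List.slice_natCast, pv_cnt_expand grid _ _ hpre]
  rcases Nat.eq_zero_or_pos y with hy0 | hy1
  · subst hy0
    rw [hout (((0 : Nat) : Int) - 1) ((x : Int)) (by omega),
        hout (((0 : Nat) : Int) - 1) ((x : Int) + 1) (by omega),
        hout (((0 : Nat) : Int) - 1) ((x : Int) - 1) (by omega)]
    by_cases h2 : 2 ≤ grid.length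
    · rw [show min grid.length (0 + 2) = 2 from by omega, show (0 - 1 : Nat) = 0 from rfl,
          show (2 - 0 : Nat) = 2 from rfl, pv_take2 grid 0 (by omega)]
      rw [show grid[0]'(by omega) = grid.getD 0 "" from (List.getD_eq_getElem _ _ (by omega)).symm,
          show grid[0+1]'(by omega) = grid.getD 1 "" from (List.getD_eq_getElem _ _ (by omega)).symm]
      simp only [List.flatMap_cons, List.flatMap_nil, List.append_nil, List.countP_append]
      rw [hrowc _ (hC 0 (by omega)), hrowc _ (hC 1 (by omega))]
      rw [show ((0 : Nat) : Int) + 1 = ((1 : Nat) : Int) from by omega]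
      simp only [hin 0 (by omega), hin 1 (by omega), hcen]
      omega
    · have h1 : grid.length = 1 := by omega
      rw [hout (((0 : Nat) : Int) + 1) ((x : Int) + 1) (by omega),
          hout (((0 : Nat) : Int) + 1) ((x : Int)) (by omega),
          hout (((0 : Nat) : Int) + 1) ((x : Int) - 1) (by omega)]
      rw [show min grid.length (0 + 2) = 1 from by omega, show (0 - 1 : Nat) = 0 from rfl,
          show (1 - 0 : Nat) = 1 from rfl, pv_take1 grid 0 (by omega)]
      rw [show grid[0]'(by omega) = grid.getD 0 "" from (List.getD_eq_getElem _ _ (by omega)).symm]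
      simp only [List.flatMap_cons, List.flatMap_nil, List.append_nil]
      rw [hrowc _ (hC 0 (by omega))]
      simp only [hin 0 (by omega), hcen]
      omega
  · rw [show ((y : Int) - 1) = ((y - 1 : Nat) : Int) from by omega,
        show ((y : Int) + 1) = ((y + 1 : Nat) : Int) from by omega]
    by_cases h2 : y + 2 ≤ grid.length
    · rw [show min grid.length (y + 2) = y + 2 from by omega,
          show (y + 2) - (y - 1) = 3 from by omega, pv_take3 grid (y - 1) (by omega)]
      rw [show grid[y-1]'(by omega) = grid.getD (y - 1) "" from (List.getD_eq_getElem _ _ (by omega)).symm,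
          show grid[y-1+1]'(by omega) = grid.getD y "" from by
            rw [← List.getD_eq_getElem grid "" (show y - 1 + 1 < grid.length from by omega),
                show y - 1 + 1 = y from by omega],
          show grid[y-1+2]'(by omega) = grid.getD (y + 1) "" from by
            rw [← List.getD_eq_getElem grid "" (show y - 1 + 2 < grid.length from by omega),
                show y - 1 + 2 = y + 1 from by omega]]
      simp only [List.flatMap_cons, List.flatMap_nil, List.append_nil, List.countP_append]
      rw [hrowc _ (hC (y - 1) (by omega)), hrowc _ (hC y hy), hrowc _ (hC (y + 1) (by omega))]
      simp only [hin (y - 1) (by omega), hin y hy, hin (y + 1) (by omega), hcen]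
      omega
    · have h1 : grid.length = y + 1 := by omega
      rw [hout (((y + 1 : Nat) : Int)) ((x : Int) + 1) (by omega),
          hout (((y + 1 : Nat) : Int)) ((x : Int)) (by omega),
          hout (((y + 1 : Nat) : Int)) ((x : Int) - 1) (by omega)]
      rw [show min grid.length (y + 2) = y + 1 from by omega,
          show (y + 1) - (y - 1) = 2 from by omega, pv_take2 grid (y - 1) (by omega)]
      rw [show grid[y-1]'(by omega) = grid.getD (y - 1) "" from (List.getD_eq_getElem _ _ (by omega)).symm,
          show grid[y-1+1]'(by omega) = grid.getD y "" from by
            rw [← List.getD_eq_getElem grid "" (show y - 1 + 1 < grid.length from by omega),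
                show y - 1 + 1 = y from by omega]]
      simp only [List.flatMap_cons, List.flatMap_nil, List.append_nil, List.countP_append]
      rw [hrowc _ (hC (y - 1) (by omega)), hrowc _ (hC y hy)]
      simp only [hin (y - 1) (by omega), hin y hy, hcen]
      omega

-- ---- the summed-area table ----
theorem pv_rcnt_zero (s : String) : pvRcnt s 0 = 0 := by
  simp [pvRcnt]

theorem pv_rcnt_succ (s : String) (k : Nat) (hk : k < s.toList.length) :
    pvRcnt s (k + 1) = pvRcnt s k + (if s.toList[k] = '@' then 1 else 0) := by
  unfold pvRcnt
  rw [List.take_add_one, List.getElem?_eq_getElem hk]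
  simp only [Option.toList_some, List.countP_append, List.countP_cons, List.countP_nil]
  by_cases h : s.toList[k] = '@' <;> simp [h]

theorem pvS_zero_col (grid : List String) (i : Nat) : pvS grid i 0 = 0 := by
  unfold pvS
  induction grid.take i with
  | nil => simp
  | cons a t _ => simp [pv_rcnt_zero]

theorem pvS_snoc (pre : List String) (r : String) (j : Nat) :
    pvS (pre ++ [r]) (pre.length + 1) j = pvS pre pre.length j + pvRcnt r j := by
  unfold pvS
  rw [List.take_of_length_le (by simp), List.take_of_length_le (by omega), List.map_append,
      List.sum_append]
  simp

theorem pvS_prefix (pre rest : List String) (i j : Nat) (hi : i ≤ pre.length) :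
    pvS (pre ++ rest) i j = pvS pre i j := by
  unfold pvS
  rw [List.take_append_of_le_length hi]

-- the inner loop of pvBuildRow, characterized
theorem pv_rowloop (prev : List Int) (row : String) (k : Nat) (hk : k ≤ row.toList.length) (hk2 : k + 1 ≤ prev.length) :
    ((PySem.List.pyRange 0 (k : Int) 1).foldl (fun (s : List Int × Int) j =>
        (s.1 ++ [(PySem.List.pyGet? prev (j + 1)).getD 0
                  + (s.2 + (if (PySem.Str.pyGet? row j).getD ' ' = '@' then 1 else 0))],
         s.2 + (if (PySem.Str.pyGet? row j).getD ' ' = '@' then 1 else 0))) ([0], 0))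
      = ((0 : Int) :: (List.range k).map (fun j => prev.getD (j + 1) 0 + pvRcnt row (j + 1)),
         pvRcnt row k) := by
  induction k with
  | zero => simp [PySem.List.pyRange_one_eq_nil, pv_rcnt_zero]
  | succ k ih =>
    have hcast : ((k + 1 : Nat) : Int) = (k : Int) + 1 := by push_cast; ring
    rw [hcast, PySem.List.pyRange_one_succ_right (by positivity), List.foldl_append,
        ih (by omega) (by omega)]
    simp only [List.foldl_cons, List.foldl_nil]
    have hget : (PySem.Str.pyGet? row (k : Int)).getD ' ' = row.toList[k]'(by omega) := by
      rw [PySem.Str.pyGet?_natCast, List.getElem?_eq_getElem (by omega)]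
      rfl
    have hprevget : (PySem.List.pyGet? prev ((k : Int) + 1)).getD 0 = prev.getD (k + 1) 0 := by
      rw [show (k : Int) + 1 = ((k + 1 : Nat) : Int) from by push_cast; ring,
          PySem.List.pyGet?_natCast, List.getElem?_eq_getElem (by omega),
          List.getD_eq_getElem _ _ (by omega)]
      rfl
    have hrc : pvRcnt row k + (if (PySem.Str.pyGet? row (k : Int)).getD ' ' = '@' then 1 else 0)
        = pvRcnt row (k + 1) := by
      rw [hget, pv_rcnt_succ row k (by omega)]
    rw [hrc, hprevget]
    rw [List.range_succ, List.map_append]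
    simp

theorem pv_buildRow_eq (prev : List Int) (row : String) (C : Nat)
    (hrow : C ≤ row.toList.length) (hprev : prev.length = C + 1) :
    pvBuildRow (C : Int) prev row
      = (0 : Int) :: (List.range C).map (fun j => prev.getD (j + 1) 0 + pvRcnt row (j + 1)) := by
  unfold pvBuildRow
  rw [pv_rowloop prev row C hrow (by omega)]

theorem pv_last_map_range {β : Type} (f : Nat → β) (n : Nat) (d : β) :
    (PySem.List.pyGet? ((List.range (n + 1)).map f) (-1)).getD d = f n := by
  rw [List.range_succ, List.map_append]
  simp [PySem.List.pyGet?_neg_one_append_singleton]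

-- the table built by B equals the mathematical summed-area table
theorem pv_buildP_go (C : Nat) (rest : List String) :
    ∀ (pre : List String), (∀ s ∈ rest, C ≤ s.toList.length) →
    rest.foldl (fun P row => P ++ [pvBuildRow (C : Int) ((PySem.List.pyGet? P (-1)).getD []) row])
      ((List.range (pre.length + 1)).map (fun i => (List.range (C + 1)).map (fun j => pvS pre i j)))
    = (List.range ((pre ++ rest).length + 1)).map (fun i =>
        (List.range (C + 1)).map (fun j => pvS (pre ++ rest) i j)) := by
  induction rest with
  | nil => intro pre _; simp
  | cons r rs ih =>
    intro pre hlen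
    rw [List.foldl_cons]
    have hstep : (List.range (pre.length + 1)).map (fun i => (List.range (C + 1)).map (fun j => pvS pre i j))
          ++ [pvBuildRow (C : Int)
              ((PySem.List.pyGet? ((List.range (pre.length + 1)).map (fun i => (List.range (C + 1)).map (fun j => pvS pre i j))) (-1)).getD []) r]
        = (List.range ((pre ++ [r]).length + 1)).map (fun i => (List.range (C + 1)).map (fun j => pvS (pre ++ [r]) i j)) := by
      rw [pv_last_map_range (fun i => (List.range (C + 1)).map (fun j => pvS pre i j)) pre.length []]
      rw [pv_buildRow_eq _ r C (hlen r (by simp)) (by simp)]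
      have hsn : ∀ j : Nat, pvS (pre ++ [r]) (pre.length + 1) j = pvS pre pre.length j + pvRcnt r j :=
        fun j => pvS_snoc pre r j
      have hrow : (0 : Int) :: (List.range C).map (fun j =>
            ((List.range (C + 1)).map (fun j => pvS pre pre.length j)).getD (j + 1) 0 + pvRcnt r (j + 1))
          = (List.range (C + 1)).map (fun j => pvS (pre ++ [r]) (pre.length + 1) j) := by
        simp only [hsn]
        refine List.ext_getElem (by simp) ?_
        intro k h1 h2
        match k with
        | 0 => simp [pvS_zero_col, pv_rcnt_zero]
        | Nat.succ j =>
          have hj : j < C := by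
            have : Nat.succ j < C + 1 := by simpa using h2
            omega
          simp only [List.getElem_cons_succ, List.getElem_map, List.getElem_range]
          rw [List.getD_eq_getElem _ _ (by simp; omega), List.getElem_map, List.getElem_range]
      rw [hrow, show (pre ++ [r]).length + 1 = (pre.length + 1) + 1 from by simp,
          List.range_succ (n := pre.length + 1), List.map_append]
      simp only [List.map_cons, List.map_nil]
      congr 1
      refine List.map_congr_left (fun i hi => ?_)
      refine List.map_congr_left (fun j hj => ?_)
      exact (pvS_prefix pre [r] i j (Nat.lt_succ_iff.mp (List.mem_range.mp hi))).symm
    rw [hstep, ih (pre ++ [r]) (fun s hs => hlen s (by simp [hs]))]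
    rw [List.append_assoc]
    rfl

theorem pvP_eq (grid : List String) (hrows : ∀ s ∈ grid, pvC grid ≤ s.toList.length) :
    pvBuildP grid (pvC grid : Int)
      = (List.range (grid.length + 1)).map (fun i =>
          (List.range (pvC grid + 1)).map (fun j => pvS grid i j)) := by
  unfold pvBuildP
  have hinit : [PySem.List.pyRepeat [(0 : Int)] ((pvC grid : Int) + 1)]
      = (List.range (([] : List String).length + 1)).map (fun i =>
          (List.range (pvC grid + 1)).map (fun j => pvS ([] : List String) i j)) := by
    rw [show ((pvC grid : Int) + 1) = ((pvC grid + 1 : Nat) : Int) from by push_cast; ring,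
        PySem.List.pyRepeat_singleton]
    simp [pvS, List.map_const']
  rw [hinit, pv_buildP_go (pvC grid) grid [] hrows]
  simp

-- table lookups hit pvS
theorem pvLook_eq (grid : List String) (hrows : ∀ s ∈ grid, pvC grid ≤ s.toList.length)
    (i j : Nat) (hi : i ≤ grid.length) (hj : j ≤ pvC grid) :
    pvLook grid (i : Int) (j : Int) = pvS grid i j := by
  unfold pvLook
  rw [pvP_eq grid hrows]
  have h1 : (PySem.List.pyGet? ((List.range (grid.length + 1)).map (fun i => (List.range (pvC grid + 1)).map (fun j => pvS grid i j))) (i : Int)).getD []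
      = (List.range (pvC grid + 1)).map (fun j => pvS grid i j) := by
    rw [PySem.List.pyGet?_natCast, List.getElem?_eq_getElem (by simp; omega), List.getElem_map,
        List.getElem_range]
    rfl
  rw [h1, PySem.List.pyGet?_natCast, List.getElem?_eq_getElem (by simp; omega), List.getElem_map,
      List.getElem_range]
  rfl

-- sum of pointwise differences
theorem pv_sum_sub {α : Type} (l : List α) (f g : α → Int) :
    (l.map f).sum - (l.map g).sum = (l.map (fun a => f a - g a)).sum := by
  induction l with
  | nil => simp
  | cons a t ih => simp [List.sum_cons] at *; omega

theorem pvS_split (grid : List String) (a b j : Nat) :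
    pvS grid (a + b) j = pvS grid a j + (((grid.drop a).take b).map (fun s => pvRcnt s j)).sum := by
  unfold pvS
  rw [List.take_add, List.map_append, List.sum_append]

theorem pv_rcnt_sub (s : String) (x1 x2 : Nat) (h : x1 ≤ x2) :
    pvRcnt s x2 - pvRcnt s x1
      = ((((s.toList.drop x1).take (x2 - x1)).countP (fun c => c == '@') : Nat) : Int) := by
  unfold pvRcnt
  have hsplit : s.toList.take x2 = s.toList.take x1 ++ (s.toList.drop x1).take (x2 - x1) := by
    rw [← List.take_add, show x1 + (x2 - x1) = x2 from by omega]
  rw [hsplit, List.countP_append]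
  push_cast
  omega

-- the inclusion-exclusion query equals the clamped 3x3 block count
theorem pv_rolls (grid : List String) (y x : Nat)
    (hy : y < grid.length) (hx : x < pvC grid) :
    pvS grid (min grid.length (y + 2)) (min (x + 2) (pvC grid))
      - pvS grid (y - 1) (min (x + 2) (pvC grid))
      - pvS grid (min grid.length (y + 2)) (x - 1)
      + pvS grid (y - 1) (x - 1)
    = ((((PySem.List.slice grid (some (max 0 ((y : Int) - 1))) (some (min (grid.length : Int) ((y : Int) + 2)))).flatMap
        (fun r => (PySem.Str.slice r (some (max 0 ((x : Int) - 1))) (some (min ((x : Int) + 2) (pvC grid : Int)))).toList)).countP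
        (fun ch => ch == '@') : Nat) : Int) := by
  have hlo : max 0 ((y : Int) - 1) = ((y - 1 : Nat) : Int) := by omega
  have hhi : min (grid.length : Int) ((y : Int) + 2) = ((min grid.length (y + 2) : Nat) : Int) := by omega
  have hxlo : max 0 ((x : Int) - 1) = ((x - 1 : Nat) : Int) := by omega
  have hxhi : min ((x : Int) + 2) (pvC grid : Int) = ((min (x + 2) (pvC grid) : Nat) : Int) := by omega
  rw [hlo, hhi, hxlo, hxhi, PySem.List.slice_natCast]
  have hy12 : y - 1 ≤ min grid.length (y + 2) := by omega
  have hx12 : x - 1 ≤ min (x + 2) (pvC grid) := by omega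
  set y1 := y - 1
  set y2 := min grid.length (y + 2)
  set x1 := x - 1
  set x2 := min (x + 2) (pvC grid)
  set band := (grid.drop y1).take (y2 - y1) with hband
  have hsplit2 : pvS grid y2 x2 - pvS grid y1 x2 = (band.map (fun s => pvRcnt s x2)).sum := by
    rw [show y2 = y1 + (y2 - y1) from by omega, pvS_split]; ring
  have hsplit1 : pvS grid y2 x1 - pvS grid y1 x1 = (band.map (fun s => pvRcnt s x1)).sum := by
    rw [show y2 = y1 + (y2 - y1) from by omega, pvS_split]; ring
  have hlhs : pvS grid y2 x2 - pvS grid y1 x2 - pvS grid y2 x1 + pvS grid y1 x1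
      = (band.map (fun s => pvRcnt s x2)).sum - (band.map (fun s => pvRcnt s x1)).sum := by
    omega
  rw [hlhs, pv_sum_sub]
  have hptwise : band.map (fun s => pvRcnt s x2 - pvRcnt s x1)
      = band.map (fun s => ((((PySem.Str.slice s (some (x1 : Int)) (some (x2 : Int))).toList).countP (fun c => c == '@') : Nat) : Int)) := by
    refine List.map_congr_left (fun s _ => ?_)
    rw [pv_rcnt_sub s x1 x2 hx12, PySem.Str.toList_slice, PySem.Chars.slice_eq_listSlice,
        PySem.List.slice_natCast]
  rw [hptwise]
  -- countP of flatMap is the sum of per-row counts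
  induction band with
  | nil => simp
  | cons r t ih =>
    simp only [List.map_cons, List.sum_cons, List.flatMap_cons, List.countP_append, ih]
    push_cast
    ring

-- ---- cellwise equality ----
theorem pv_cell_eq (grid : List String) (hpre : Pre_find_accessible_spots grid) (y x : Nat)
    (hy : y < grid.length) (hx : x < pvC grid) :
    pvCellA grid (y : Int) (x : Int) = pvCellB grid (y : Int) (x : Int) := by
  have hrows : ∀ s ∈ grid, pvC grid ≤ s.toList.length := hpre.2
  have hlenrow : pvC grid ≤ (grid.getD y "").toList.length := by
    rw [List.getD_eq_getElem _ _ hy]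
    exact pv_rowlen grid hpre y hy
  have hv : pvCellStr grid (y : Int) (x : Int)
      = String.ofList [(grid.getD y "").toList.getD x ' '] := by
    have h := pv_cellStr_at grid hpre (y : Int) (x : Int) (by omega) (by omega) (by omega) (by omega)
    simpa using h
  unfold pvCellA pvCellB
  rw [hv]
  by_cases hch : (grid.getD y "").toList.getD x ' ' = '@'
  · rw [hch]
    rw [if_neg (show ¬ (String.ofList ['@'] ≠ "@") from fun h => h rfl),
        if_neg (show ¬ (String.ofList ['@'] ≠ "@") from fun h => h rfl)]
    -- rewrite B's Int clamps to Nat casts, then lookups to pvS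
    have e1 : min ((grid.length : Nat) : Int) ((y : Int) + 2) = ((min grid.length (y + 2) : Nat) : Int) := by omega
    have e2 : max 0 ((y : Int) - 1) = ((y - 1 : Nat) : Int) := by omega
    have e3 : min ((pvC grid : Nat) : Int) ((x : Int) + 2) = ((min (x + 2) (pvC grid) : Nat) : Int) := by omega
    have e4 : max 0 ((x : Int) - 1) = ((x - 1 : Nat) : Int) := by omega
    rw [e1, e2, e3, e4,
        pvLook_eq grid hrows _ _ (by omega) (by omega),
        pvLook_eq grid hrows _ _ (by omega) (by omega),
        pvLook_eq grid hrows _ _ (by omega) (by omega),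
        pvLook_eq grid hrows _ _ (by omega) (by omega)]
    have hq := pv_rolls grid y x hy hx
    rw [show pvS grid (min grid.length (y + 2)) (min (x + 2) (pvC grid))
          - pvS grid (y - 1) (min (x + 2) (pvC grid))
          - pvS grid (min grid.length (y + 2)) (x - 1)
          + pvS grid (y - 1) (x - 1) - 1
        = (((pvCnt grid (y : Int) (x : Int) + 1 : Nat) : Int)) - 1 from by
          rw [← pv_block grid hpre y x hy hx hch]; omega]
    by_cases hcnt : (pvCnt grid (y : Int) (x : Int) : Int) < 4
    · rw [if_pos hcnt, if_pos (by push_cast; omega)]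
    · rw [if_neg hcnt, if_neg (by push_cast; omega)]
  · have hne : String.ofList [(grid.getD y "").toList.getD x ' '] ≠ "@" :=
      fun h => hch (by simpa using congrArg String.toList h)
    rw [if_pos hne, if_pos hne]

-- ===== VERDICT (by name: the statement is the Claim_ definition above) =====
theorem find_accessible_spots_spec : Claim_equal_find_accessible_spots := by
  intro grid _ hpre
  unfold Spec_find_accessible_spots
  rw [pvA_eq grid hpre.1, pvB_eq grid hpre.1]
  refine List.map_congr_left (fun y hy => List.map_congr_left (fun x hx => ?_))
  exact pv_cell_eq grid hpre y x (List.mem_range.mp hy) (List.mem_range.mp hx)
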